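-- pv_equiv track=rewrite | github.com/kipp12/FYP_Propaganda_Detection | src/data/bio.py | token_bio_to_char_offsets
-- ===== SOURCE A (Python) =====
-- def token_bio_to_char_offsets(labels: list, offset_mapping: list) -> list:
--     """
--     Reconstruct character-level span offsets from transformer token-level
--     BIO predictions.
--
--     Args:
--         labels:         list of integer labels (0=O, 1=B, 2=I, -100=ignore)
--         offset_mapping: list of (start, end) per token
--
--     Returns:
--         List of (start, end) character offset tuples.
--     """
--     spans = []
--     span_start = None
--     span_end = None
--
--     for label, (tok_start, tok_end) in zip(labels, offset_mapping):
--         if label == -100: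
--             continue
--         if label == 1:  # B
--             if span_start is not None:
--                 spans.append((span_start, span_end))
--             span_start = tok_start
--             span_end = tok_end
--         elif label == 2 and span_start is not None:  # I
--             span_end = tok_end
--         else:  # O
--             if span_start is not None:
--                 spans.append((span_start, span_end))
--             span_start = None
--             span_end = None
--
--     if span_start is not None:
--         spans.append((span_start, span_end))
--
--     return spans
-- ===== SOURCE B (Python) =====
-- def token_bio_to_char_offsets(labels: list, offset_mapping: list) -> list:
--     """Index-driven scan: find a B token, then consume following I tokens."""
--     pairs = list(zip(labels, offset_mapping))
--     n = len(pairs)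
--     spans = []
--     i = 0
--     while i < n:
--         label, (tok_start, tok_end) = pairs[i]
--         i += 1
--         if label != 1:
--             continue  # O, stray I, or -100: never starts an entity
--         start, end = tok_start, tok_end
--         while i < n:
--             lab, (_, e) = pairs[i]
--             if lab == -100:
--                 i += 1
--             elif lab == 2:
--                 end = e
--                 i += 1
--             else:
--                 break
--         spans.append((start, end))
--     return spans
-- ===== Notes on version B (the rewrite author's own statement) =====
-- stated objective: alternative
-- what changed: Replaces A's single fold carrying an optional open-span state by a two-level cursor scan: an outer loop looks for a B token and an inner loop consumes the following -100/I tokens before emitting the span.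
import Mathlib
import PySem

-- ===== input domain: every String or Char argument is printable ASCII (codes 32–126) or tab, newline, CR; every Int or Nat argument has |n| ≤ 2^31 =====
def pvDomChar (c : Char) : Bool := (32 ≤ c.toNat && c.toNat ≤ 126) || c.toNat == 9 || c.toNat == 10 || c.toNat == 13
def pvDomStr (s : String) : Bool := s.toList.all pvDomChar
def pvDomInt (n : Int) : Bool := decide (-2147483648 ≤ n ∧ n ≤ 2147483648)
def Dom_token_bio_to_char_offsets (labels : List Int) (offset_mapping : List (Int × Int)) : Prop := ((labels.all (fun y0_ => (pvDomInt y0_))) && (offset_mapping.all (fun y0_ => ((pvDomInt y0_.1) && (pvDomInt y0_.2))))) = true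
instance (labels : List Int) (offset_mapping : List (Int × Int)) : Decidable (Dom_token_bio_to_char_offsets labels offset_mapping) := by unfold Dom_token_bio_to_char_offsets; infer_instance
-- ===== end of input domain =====

-- B replaces A's single fold with an optional open-span state by an outer find-a-B /
-- inner consume-the-I's cursor scan; same O(n) cost, different decomposition.


-- ===== PORT A =====
-- one iteration of A's for-loop: state = (spans so far, open span if any)
def bioStepA (st : List (Int × Int) × Option (Int × Int)) (p : Int × (Int × Int)) :
    List (Int × Int) × Option (Int × Int) :=
  let (spans, cur) := st
  let (label, ts) := p
  if label = -100 then (spans, cur)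
  else if label = 1 then
    match cur with
    | some sp => (spans ++ [sp], some ts)
    | none => (spans, some ts)
  else if label = 2 then
    match cur with
    | some sp => (spans, some (sp.1, ts.2))   -- span_end = tok_end
    | none => (spans, none)                    -- falls to Python's else; span_start is None: no-op
  else
    match cur with
    | some sp => (spans ++ [sp], none)
    | none => (spans, none)

def token_bio_to_char_offsets (labels : List Int) (offset_mapping : List (Int × Int)) : List (Int × Int) :=
  let st := (labels.zip offset_mapping).foldl bioStepA ([], none)
  match st.2 with
  | some sp => st.1 ++ [sp]
  | none => st.1

-- ===== PORT B =====
-- inner cursor: consume -100 and I tokens after a B, return the finished span and the rest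
def bioConsume : List (Int × (Int × Int)) → Int → Int → (Int × Int) × List (Int × (Int × Int))
  | [], s, e => ((s, e), [])
  | (lab, te) :: rest, s, e =>
    if lab = -100 then bioConsume rest s e
    else if lab = 2 then bioConsume rest s te.2
    else ((s, e), (lab, te) :: rest)

theorem bioConsume_length (l : List (Int × (Int × Int))) (s e : Int) :
    (bioConsume l s e).2.length ≤ l.length := by
  induction l generalizing s e with
  | nil => simp [bioConsume]
  | cons p rest ih =>
    simp only [bioConsume]
    split_ifs with h1 h2
    · exact le_trans (ih s e) (Nat.le_succ _)
    · exact le_trans (ih s p.2.2) (Nat.le_succ _)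
    · simp

-- outer cursor: skip until a B token, then consume its insides
def bioOuter : List (Int × (Int × Int)) → List (Int × Int)
  | [] => []
  | (lab, te) :: rest =>
    if lab = 1 then
      let r := bioConsume rest te.1 te.2
      r.1 :: bioOuter r.2
    else bioOuter rest
termination_by l => l.length
decreasing_by
  · exact Nat.lt_succ_of_le (bioConsume_length rest te.1 te.2)
  · simp

def token_bio_to_char_offsets_alt (labels : List Int) (offset_mapping : List (Int × Int)) : List (Int × Int) :=
  bioOuter (labels.zip offset_mapping)

-- ===== PRECONDITION & SPEC =====
def Spec_token_bio_to_char_offsets (labels : List Int) (offset_mapping : List (Int × Int)) (out : List (Int × Int)) : Prop := out = token_bio_to_char_offsets_alt labels offset_mapping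
instance (labels : List Int) (offset_mapping : List (Int × Int)) (out : List (Int × Int)) : Decidable (Spec_token_bio_to_char_offsets labels offset_mapping out) := by unfold Spec_token_bio_to_char_offsets; infer_instance

-- ===== CLAIM (what is proved, stated in full; the proofs are below) =====
def Claim_equal_token_bio_to_char_offsets : Prop := ∀ (labels : List Int) (offset_mapping : List (Int × Int)), Dom_token_bio_to_char_offsets labels offset_mapping → Spec_token_bio_to_char_offsets labels offset_mapping (token_bio_to_char_offsets labels offset_mapping)

-- ===== LEMMAS AND PROOFS =====
-- finish A's fold state as A does after the loop
def bioFinish (st : List (Int × Int) × Option (Int × Int)) : List (Int × Int) :=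
  match st.2 with
  | some sp => st.1 ++ [sp]
  | none => st.1

-- joint loop invariant: A's fold from a closed state yields bioOuter; from an open
-- state (s,e) it yields the span bioConsume finishes plus bioOuter of the rest.
theorem bio_invariant (l : List (Int × (Int × Int))) :
    (∀ spans, bioFinish (l.foldl bioStepA (spans, none)) = spans ++ bioOuter l) ∧
    (∀ spans s e, bioFinish (l.foldl bioStepA (spans, some (s, e))) =
      spans ++ (bioConsume l s e).1 :: bioOuter (bioConsume l s e).2) := by
  induction l with
  | nil => constructor <;> intros <;> simp [bioFinish, bioOuter, bioConsume]
  | cons p rest ih =>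
    obtain ⟨ihn, ihs⟩ := ih
    obtain ⟨lab, ts, te⟩ := p
    constructor
    · intro spans
      by_cases h100 : lab = -100
      · simp [bioStepA, bioOuter, h100, ihn]
      by_cases h1 : lab = 1
      · simp [bioStepA, bioOuter, h100, h1, ihs]
      by_cases h2 : lab = 2
      · simp [bioStepA, bioOuter, h100, h1, h2, ihn]
      · simp [bioStepA, bioOuter, h100, h1, h2, ihn]
    · intro spans s e
      by_cases h100 : lab = -100
      · simp [bioStepA, bioConsume, bioOuter, h100, ihs]
      by_cases h1 : lab = 1
      · have h2 : lab ≠ 2 := by omega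
        simp [bioStepA, bioConsume, bioOuter, h100, h1, h2, ihs]
      by_cases h2 : lab = 2
      · simp [bioStepA, bioConsume, bioOuter, h100, h1, h2, ihs]
      · simp [bioStepA, bioConsume, bioOuter, h100, h1, h2, ihn]

-- ===== VERDICT (by name: the statement is the Claim_ definition above) =====
theorem token_bio_to_char_offsets_spec : Claim_equal_token_bio_to_char_offsets := by
  intro labels om _
  unfold Spec_token_bio_to_char_offsets token_bio_to_char_offsets token_bio_to_char_offsets_alt
  simpa [bioFinish] using (bio_invariant (labels.zip om)).1 []
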